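-- pv_equiv track=rewrite | github.com/DCP-arca/NAI-Tag-Viewer | prompt_converter.py | count_before
-- ===== SOURCE A (Python) =====
-- def count_before(text, pos, target, stopper):
--     """
--     Count occurrences of target character to the left of pos,
--     stopping at stopper character
--     """
--     count = 0
--     i = pos - 1
--     while i >= 0:
--         if text[i] == stopper:
--             break
--         if text[i] == target:
--             count += 1
--         i -= 1
--     return count
-- ===== SOURCE B (Python) =====
-- def count_before(text, pos, target, stopper):
--     """Count occurrences of target character to the left of pos, stopping at stopper."""
--     if pos <= 0:
--         return 0
--     prefix = text[:pos]
--     cut = -1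
--     for i, c in enumerate(prefix):
--         if c == stopper:
--             cut = i
--     return sum(1 for c in prefix[cut + 1:] if c == target)
-- ===== Notes on version B (the rewrite author's own statement) =====
-- stated objective: simpler
-- what changed: Replaces A's backward index loop with break by a forward pass recording the last stopper position and a count over the slice after it.
import Mathlib
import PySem

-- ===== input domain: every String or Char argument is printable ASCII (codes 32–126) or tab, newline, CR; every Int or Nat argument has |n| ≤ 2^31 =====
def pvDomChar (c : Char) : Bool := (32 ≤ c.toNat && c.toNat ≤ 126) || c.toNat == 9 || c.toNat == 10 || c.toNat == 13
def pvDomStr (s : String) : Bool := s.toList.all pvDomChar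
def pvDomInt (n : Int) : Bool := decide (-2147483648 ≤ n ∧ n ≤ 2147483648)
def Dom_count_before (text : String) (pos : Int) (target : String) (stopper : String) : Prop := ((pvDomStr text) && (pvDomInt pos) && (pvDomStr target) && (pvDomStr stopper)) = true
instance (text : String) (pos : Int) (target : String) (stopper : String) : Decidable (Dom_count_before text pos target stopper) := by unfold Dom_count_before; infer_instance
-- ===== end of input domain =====

-- B replaces A's backward scan-with-break by a forward pass locating the last stopper plus a count
-- over the remaining segment (objective: simpler). Return-value equivalence only; no mutation.

-- ===== PORT A =====
-- while i >= 0: …  (Python's text[i] == stopper with text[i] a 1-char string is exactly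
-- stopper.toList = [c]; pyGet? none = IndexError, excluded by Pre_; dummy value there)
def countALoop (cs : List Char) (target stopper : String) (i : Int) (count : Int) : Int :=
  if i < 0 then count
  else
    match PySem.List.pyGet? cs i with
    | none => count  -- Python raises IndexError here; Pre_count_before excludes these inputs
    | some c =>
      if stopper.toList = [c] then count
      else countALoop cs target stopper (i - 1) (if target.toList = [c] then count + 1 else count)
termination_by (i + 1).toNat
decreasing_by simp at *; omega

def count_before (text : String) (pos : Int) (target : String) (stopper : String) : Int :=
  countALoop text.toList target stopper (pos - 1) 0

-- ===== PORT B =====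
-- cut = -1; for i, c in enumerate(pre): if c == stopper: cut = i
def cutOf (stopper : String) (pre : List Char) : Int :=
  (PySem.List.enumerate pre 0).foldl
    (fun acc p => if stopper.toList = [p.2] then p.1 else acc) (-1)

def count_before_alt (text : String) (pos : Int) (target : String) (stopper : String) : Int :=
  if pos ≤ 0 then 0
  else
    let pre := text.toList.take pos.toNat        -- text[:pos], pos > 0: slice clamps like take
    let cut := cutOf stopper pre
    -- sum(1 for c in pre[cut+1:] if c == target)
    (((pre.drop (cut + 1).toNat).filter (fun c => decide (target.toList = [c]))).length : Int)

-- ===== PRECONDITION & SPEC =====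
-- A raises IndexError as soon as i = pos - 1 reaches past the end, i.e. whenever pos > len(text).
def Pre_count_before (text : String) (pos : Int) (target : String) (stopper : String) : Prop :=
  pos ≤ (text.toList.length : Int)
instance (text : String) (pos : Int) (target : String) (stopper : String) : Decidable (Pre_count_before text pos target stopper) := by unfold Pre_count_before; infer_instance

def pvWitness_count_before : String × Int × String × String := ("ab,ab", 4, "a", ",")

def Spec_count_before (text : String) (pos : Int) (target : String) (stopper : String) (out : Int) : Prop := out = count_before_alt text pos target stopper
instance (text : String) (pos : Int) (target : String) (stopper : String) (out : Int) : Decidable (Spec_count_before text pos target stopper out) := by unfold Spec_count_before; infer_instance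

-- ===== CLAIM (what is proved, stated in full; the proofs are below) =====
def Claim_equal_count_before : Prop := ∀ (text : String) (pos : Int) (target : String) (stopper : String), Dom_count_before text pos target stopper → Pre_count_before text pos target stopper → Spec_count_before text pos target stopper (count_before text pos target stopper)

-- ===== LEMMAS AND PROOFS =====

-- Reference: count of target in a reversed pre, up to the first stopper.
def refCount (target stopper : String) : List Char → Int
  | [] => 0
  | c :: rest =>
    if stopper.toList = [c] then 0
    else (if target.toList = [c] then 1 else 0) + refCount target stopper rest

theorem countALoop_eq (cs : List Char) (target stopper : String) :
    ∀ (n : Nat), n ≤ cs.length → ∀ (count : Int),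
      countALoop cs target stopper ((n : Int) - 1) count
        = count + refCount target stopper ((cs.take n).reverse) := by
  intro n
  induction n with
  | zero => intro _ count; rw [countALoop]; simp [refCount]
  | succ m ih =>
    intro hle count
    have hm : m < cs.length := by omega
    rw [countALoop]
    have hi : ¬ ((m + 1 : Nat) : Int) - 1 < 0 := by push_cast; omega
    simp only [hi, if_false]
    have hget : PySem.List.pyGet? cs (((m + 1 : Nat) : Int) - 1) = some cs[m] := by
      have : ((m + 1 : Nat) : Int) - 1 = (m : Int) := by push_cast; ring
      rw [this, PySem.List.pyGet?_natCast]
      simp [hm]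
    rw [hget]
    have htake : cs.take (m + 1) = cs.take m ++ [cs[m]] := by
      rw [List.take_succ]; simp [hm]
    rw [htake, List.reverse_append]
    simp only [List.reverse_singleton, List.singleton_append, refCount]
    by_cases hs : stopper.toList = [cs[m]]
    · simp [hs]
    · simp only [hs, if_false]
      have : ((m + 1 : Nat) : Int) - 1 - 1 = (m : Int) - 1 := by push_cast; ring
      rw [this, ih (by omega)]
      by_cases ht : target.toList = [cs[m]] <;> simp [ht] <;> ring

theorem cutOf_nil (stopper : String) : cutOf stopper [] = -1 := rfl

theorem cutOf_append (stopper : String) (pre : List Char) (c : Char) :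
    cutOf stopper (pre ++ [c])
      = if stopper.toList = [c] then (pre.length : Int) else cutOf stopper pre := by
  unfold cutOf
  rw [PySem.List.enumerate_append, List.foldl_append]
  simp [PySem.List.enumerate]

theorem cutOf_bounds (stopper : String) (pre : List Char) :
    -1 ≤ cutOf stopper pre ∧ cutOf stopper pre < (pre.length : Int) := by
  induction pre using List.reverseRecOn with
  | nil => simp [cutOf_nil]
  | append_singleton pre c ih =>
    rw [cutOf_append]
    by_cases hs : stopper.toList = [c] <;> simp [hs] <;> omega

-- B's body on a pre equals refCount on its reverse.
theorem alt_body_eq (target stopper : String) (pre : List Char) :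
    (((pre.drop (cutOf stopper pre + 1).toNat).filter
        (fun c => decide (target.toList = [c]))).length : Int)
      = refCount target stopper pre.reverse := by
  induction pre using List.reverseRecOn with
  | nil => simp [cutOf_nil, refCount]
  | append_singleton pre c ih =>
    rw [cutOf_append, List.reverse_append]
    simp only [List.reverse_singleton, List.singleton_append, refCount]
    by_cases hs : stopper.toList = [c]
    · simp only [hs, if_true]
      have : ((pre.length : Int) + 1).toNat = pre.length + 1 := by omega
      rw [this]
      simp
    · simp only [hs, if_false]
      obtain ⟨h1, h2⟩ := cutOf_bounds stopper pre
      have hle : (cutOf stopper pre + 1).toNat ≤ pre.length := by omega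
      rw [List.drop_append_of_le_length hle, List.filter_append]
      simp only [List.length_append]
      by_cases ht : target.toList = [c] <;> simp [ht, ← ih] <;> push_cast <;> ring

theorem count_before_spec : Claim_equal_count_before := by
  intro text pos target stopper _ hpre
  unfold Spec_count_before count_before count_before_alt
  by_cases hp : pos ≤ 0
  · have : pos - 1 < 0 := by omega
    rw [countALoop]
    simp [this, hp]
  · simp only [hp, if_false]
    have hn : pos.toNat ≤ text.toList.length := by
      unfold Pre_count_before at hpre; omega
    have hcast : ((pos.toNat : Int)) - 1 = pos - 1 := by omega
    rw [← hcast, countALoop_eq text.toList target stopper pos.toNat hn 0,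
        alt_body_eq target stopper (text.toList.take pos.toNat)]
    ring
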